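-- pv_equiv track=rewrite | github.com/ankitmittal-AIPM/meal-taxonomy | src/meal_taxonomy/ontologies/build_ingredient_category_tags.py | auto_discover_category_roots
-- ===== SOURCE A (Python) =====
-- def auto_discover_category_roots(ontology_nodes, ontology_relations, min_descendants=20):
--     """
--     Instead of manually specifying categories, the system can:
--     Automatically detect good candidate category roots by analyzing your FoodOn ontology tree.
--     This is what “smart ontology systems” do
--
--     We treat any node with many descendants as a 'category root'.
--
--     NEW BEHAVIOR >>
--     i. The system looks at your existing ontology_nodes (FoodOn).
--     ii.Identifies all high-level classes (parents that have many descendants).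
--     iii.Uses heuristics to pick top categories (e.g., dairy, meat, legume, herb, spice).
--     iv. Assigns them as category roots automatically.
--     v. Still allows manual overrides.
--     """
--     # Build parent-child mappings
--     child_to_parent = {child: parent for parent, child in ontology_relations}
--     parent_to_children = {}
--     # Reverse mapping of child_to_parent
--     for child, parent in child_to_parent.items():
--         parent_to_children.setdefault(parent, []).append(child)
--
--     # Function to count descendants
--     def count_descendants(node):
--         visited = set()
--         stack = [node]
--         while stack:
--             n = stack.pop()
--             if n in visited:
--                 continue
--             visited.add(n)
--             stack.extend(parent_to_children.get(n, []))
--         return len(visited)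
--
--     # Find nodes with many descendants
--     category_roots = {}
--     for node_id, iri in ontology_nodes.items():
--         descendants = count_descendants(node_id)
--         if descendants >= min_descendants:
--             label = iri.split("/")[-1]  # fallback name
--             category_roots[label] = iri
--
--     return category_roots
-- ===== SOURCE B (Python) =====
-- def auto_discover_category_roots(ontology_nodes, ontology_relations, min_descendants=20):
--     # Different algorithm: no parent->children map and no per-node DFS.
--     # One upward parent-chain walk per child accumulates, for every node,
--     # how many nodes' chains pass through it; that count (+1 for nodes that
--     # are not themselves children) is exactly the DFS descendant count.
--     child_to_parent = {child: parent for parent, child in ontology_relations}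
--     counts = {}
--     for child in child_to_parent:
--         seen = set()
--         cur = child
--         while cur is not None and cur not in seen:
--             seen.add(cur)
--             counts[cur] = counts.get(cur, 0) + 1
--             cur = child_to_parent.get(cur)
--     category_roots = {}
--     for node_id, iri in ontology_nodes.items():
--         descendants = counts.get(node_id, 0) + (0 if node_id in child_to_parent else 1)
--         if descendants >= min_descendants:
--             category_roots[iri.split("/")[-1]] = iri
--     return category_roots
-- ===== Notes on version B (the rewrite author's own statement) =====
-- stated objective: alternative
-- what changed: A builds a parent-to-children map and runs a full visited-set stack DFS from every ontology node; B never builds that map: it walks the parent chain upward once per child of the relation dict, accumulating in one counter dict how many chains pass through each node, which equals A's per-node DFS descendant count.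
import Mathlib
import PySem

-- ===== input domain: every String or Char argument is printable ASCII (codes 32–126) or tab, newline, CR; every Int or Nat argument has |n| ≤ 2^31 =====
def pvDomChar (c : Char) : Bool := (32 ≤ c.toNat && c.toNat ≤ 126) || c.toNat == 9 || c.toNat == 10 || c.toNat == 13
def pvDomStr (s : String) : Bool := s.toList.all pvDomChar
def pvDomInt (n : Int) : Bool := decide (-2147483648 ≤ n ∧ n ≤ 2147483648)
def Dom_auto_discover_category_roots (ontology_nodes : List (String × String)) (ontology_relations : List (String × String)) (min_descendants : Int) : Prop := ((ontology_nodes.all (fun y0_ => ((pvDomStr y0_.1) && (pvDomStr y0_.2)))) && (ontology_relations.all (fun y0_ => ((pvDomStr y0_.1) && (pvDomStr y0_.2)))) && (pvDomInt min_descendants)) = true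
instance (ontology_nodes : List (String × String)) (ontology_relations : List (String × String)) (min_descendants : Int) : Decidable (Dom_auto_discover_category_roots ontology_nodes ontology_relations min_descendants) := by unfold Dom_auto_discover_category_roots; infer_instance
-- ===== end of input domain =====

-- B replaces A's per-node DFS over a parent→children map by one upward parent-chain
-- walk per child that accumulates, for every node, how many chains pass through it
-- (objective: alternative algorithm, same measured cost).

-- ===== PORT A =====
-- shared helper (identical expression in both Pythons): iri.split("/")[-1]
def pvLabel (iri : String) : String :=
  PySem.List.pyGetD ((PySem.Str.split? iri "/").getD []) (-1) iri
-- shared helper (identical comprehension in both Pythons):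
-- child_to_parent = {child: parent for parent, child in ontology_relations}
def pvC2p (ontology_relations : List (String × String)) : PySem.Dict String String :=
  ontology_relations.foldl (fun d pc => d.insert pc.2 pc.1) PySem.Dict.empty

-- measure used only for termination of the two loop ports
def pvUnseen (U : List String) (V : PySem.Set String) : Nat :=
  (U.filter (fun x => !V.contains x)).length

theorem pvUnseen_lt (U : List String) (V : PySem.Set String) (n : String)
    (hU : n ∈ U) (hV : V.contains n = false) : pvUnseen U (V.add n) < pvUnseen U V := by
  have hnV : n ∉ V := by
    intro hm; rw [(PySem.Set.contains_iff V n).mpr hm] at hV; cases hV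
  have hmono : ∀ a : String, (!(V.add n).contains a) = true → (!V.contains a) = true := by
    intro a ha
    simp only [Bool.not_eq_true'] at ha ⊢
    have hma : a ∉ V.add n := fun hm => by
      rw [(PySem.Set.contains_iff _ a).mpr hm] at ha; cases ha
    have haV : a ∉ V := fun hm => hma ((PySem.Set.mem_add V n a).mpr (Or.inl hm))
    cases hc : V.contains a with
    | false => rfl
    | true => exact absurd ((PySem.Set.contains_iff V a).mp hc) haV
  have hsub : List.Sublist (U.filter (fun x => !(V.add n).contains x))
      (U.filter (fun x => !V.contains x)) := List.monotone_filter_right U hmono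
  unfold pvUnseen
  refine Nat.lt_of_le_of_ne hsub.length_le fun he => ?_
  have heq := hsub.eq_of_length he
  have hnin : n ∈ U.filter (fun x => !V.contains x) := List.mem_filter.mpr ⟨hU, by rw [hV]; rfl⟩
  rw [← heq] at hnin
  have h2 : n ∉ V.add n := by have := (List.mem_filter.mp hnin).2; simpa using this
  exact h2 ((PySem.Set.mem_add V n n).mpr (Or.inr rfl))

theorem pv_mem_getD_flatten (d : PySem.Dict String (List String)) (k x : String)
    (h : x ∈ d.getD k []) : x ∈ d.values.flatten := by
  rw [PySem.Dict.getD_eq_get?_getD] at h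
  rcases hg : d.get? k with _ | l
  · simp [hg] at h
  · rw [hg] at h
    have : (k, l) ∈ d.items := PySem.Dict.mem_items_of_get?_eq_some d hg
    have hl : l ∈ d.values := by
      simp only [PySem.Dict.values]
      exact List.mem_map.mpr ⟨(k, l), this, rfl⟩
    exact List.mem_flatten.mpr ⟨l, hl, h⟩

-- parent_to_children: for child, parent in child_to_parent.items(): setdefault(parent, []).append(child)
def pvP2c (c2p : PySem.Dict String String) : PySem.Dict String (List String) :=
  c2p.items.foldl (fun d cp => d.insert cp.2 (d.getD cp.2 [] ++ [cp.1])) PySem.Dict.empty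

-- A's stack DFS, literally; the stack is held top-first (Python pops from the END of
-- the list and extends at the end: pop() = head here, extend(children) = reverse-prepend).
-- U with its two membership hypotheses is only a termination guard (all pushed nodes lie in U).
def pvDfs (f : String → List String) (U : List String) (hf : ∀ n x, x ∈ f n → x ∈ U)
    (visited : PySem.Set String) (stack : List String) (hst : ∀ x ∈ stack, x ∈ U) :
    PySem.Set String :=
  match stack with
  | [] => visited
  | n :: rest =>
    if h : visited.contains n then
      pvDfs f U hf visited rest (fun x hx => hst x (List.mem_cons_of_mem _ hx))
    else
      pvDfs f U hf (visited.add n) ((f n).reverse ++ rest)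
        (fun x hx => by
          rcases List.mem_append.mp hx with h1 | h2
          · exact hf n x (List.mem_reverse.mp h1)
          · exact hst x (List.mem_cons_of_mem _ h2))
  termination_by (pvUnseen U visited, stack.length)
  decreasing_by
  · exact Prod.Lex.right _ (Nat.lt_succ_self _)
  · exact Prod.Lex.left _ _
      (pvUnseen_lt U visited n (hst n List.mem_cons_self) (by simp_all))

-- count_descendants(node) = len(visited) after the DFS
def pvCountDesc (c2p : PySem.Dict String String) (node : String) : Nat :=
  (pvDfs (fun n => (pvP2c c2p).getD n []) (node :: (pvP2c c2p).values.flatten)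
     (fun n x hx => List.mem_cons_of_mem _ (pv_mem_getD_flatten (pvP2c c2p) n x hx))
     PySem.Set.empty [node]
     (fun x hx => by simp only [List.mem_singleton] at hx; exact hx ▸ List.mem_cons_self)).length

def auto_discover_category_roots (ontology_nodes : List (String × String)) (ontology_relations : List (String × String)) (min_descendants : Int) : List (String × String) :=
  (ontology_nodes.foldl
    (fun acc ni =>
      if min_descendants ≤ (pvCountDesc (pvC2p ontology_relations) ni.1 : Int)
      then acc.insert (pvLabel ni.2) ni.2 else acc)
    PySem.Dict.empty).items

-- ===== PORT B =====
theorem pv_mem_values_of_get? (d : PySem.Dict String String) (k v : String)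
    (h : d.get? k = some v) : v ∈ d.values := by
  simp only [PySem.Dict.values]
  exact List.mem_map.mpr ⟨(k, v), PySem.Dict.mem_items_of_get?_eq_some d h, rfl⟩

-- B's while loop: walk the parent chain from cur, adding each new node to seen and
-- bumping its entry in counts; stops at None or at a revisit.
-- U with its hypotheses is only a termination guard.
def pvChain (c2p : PySem.Dict String String) (U : List String)
    (hvals : ∀ v ∈ c2p.values, v ∈ U)
    (seen : PySem.Set String) (counts : PySem.Dict String Int) (cur : Option String)
    (hcur : ∀ x, cur = some x → x ∈ U) : PySem.Set String × PySem.Dict String Int :=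
  match cur with
  | none => (seen, counts)
  | some x =>
    if h : seen.contains x then (seen, counts)
    else
      pvChain c2p U hvals (seen.add x) (counts.insert x (counts.getD x 0 + 1)) (c2p.get? x)
        (fun y hy => hvals y (pv_mem_values_of_get? c2p x y hy))
  termination_by pvUnseen U seen
  decreasing_by exact pvUnseen_lt U seen x (hcur x rfl) (by simp_all)

-- for child in child_to_parent: one chain walk per child, threading counts
def pvCountsB (c2p : PySem.Dict String String) : PySem.Dict String Int :=
  c2p.keys.foldl
    (fun counts c =>
      (pvChain c2p (c :: c2p.values) (fun v hv => List.mem_cons_of_mem _ hv)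
         PySem.Set.empty counts (some c)
         (fun x hx => by injection hx with h; exact h ▸ List.mem_cons_self)).2)
    PySem.Dict.empty

def auto_discover_category_roots_alt (ontology_nodes : List (String × String)) (ontology_relations : List (String × String)) (min_descendants : Int) : List (String × String) :=
  (ontology_nodes.foldl
    (fun acc ni =>
      if min_descendants ≤
          (pvCountsB (pvC2p ontology_relations)).getD ni.1 0 +
            (if (pvC2p ontology_relations).contains ni.1 then 0 else 1)
      then acc.insert (pvLabel ni.2) ni.2 else acc)
    PySem.Dict.empty).items

-- ===== PRECONDITION & SPEC =====
def Spec_auto_discover_category_roots (ontology_nodes : List (String × String)) (ontology_relations : List (String × String)) (min_descendants : Int) (out : List (String × String)) : Prop := out = auto_discover_category_roots_alt ontology_nodes ontology_relations min_descendants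
instance (ontology_nodes : List (String × String)) (ontology_relations : List (String × String)) (min_descendants : Int) (out : List (String × String)) : Decidable (Spec_auto_discover_category_roots ontology_nodes ontology_relations min_descendants out) := by unfold Spec_auto_discover_category_roots; infer_instance

-- ===== CLAIM (what is proved, stated in full; the proofs are below) =====
def Claim_equal_auto_discover_category_roots : Prop := ∀ (ontology_nodes : List (String × String)) (ontology_relations : List (String × String)) (min_descendants : Int), Dom_auto_discover_category_roots ontology_nodes ontology_relations min_descendants → Spec_auto_discover_category_roots ontology_nodes ontology_relations min_descendants (auto_discover_category_roots ontology_nodes ontology_relations min_descendants)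

-- ===== LEMMAS AND PROOFS =====

-- reachability avoiding a visited list V, along edges b ∈ f a
inductive pvRA (f : String → List String) (V : List String) : String → String → Prop where
  | refl : ∀ s, s ∉ V → pvRA f V s s
  | step : ∀ s c t, s ∉ V → c ∈ f s → pvRA f V c t → pvRA f V s t

theorem pvRA_head_not_mem {f V s m} (h : pvRA f V s m) : s ∉ V := by
  cases h <;> assumption

theorem pvRA_mono {f V n s m} (h : pvRA f (V ++ [n]) s m) : pvRA f V s m := by
  induction h with
  | refl s hs => exact pvRA.refl s (fun hv => hs (List.mem_append.mpr (Or.inl hv)))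
  | step s c t hs hc _ ih =>
      exact pvRA.step s c t (fun hv => hs (List.mem_append.mpr (Or.inl hv))) hc ih

theorem pvRA_split {f V n s m} (hn : n ∉ V) (h : pvRA f V s m) :
    pvRA f (V ++ [n]) s m ∨ m = n ∨ ∃ c ∈ f n, pvRA f (V ++ [n]) c m := by
  induction h with
  | refl s hs =>
      by_cases hsn : s = n
      · exact Or.inr (Or.inl hsn)
      · exact Or.inl (pvRA.refl s (by simp [hsn, hs]))
  | step s c t hs hc _ ih =>
      rcases ih with h1 | h2 | ⟨c', hc', h3⟩
      · by_cases hsn : s = n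
        · subst hsn; exact Or.inr (Or.inr ⟨c, hc, h1⟩)
        · exact Or.inl (pvRA.step s c t (by simp [hsn, hs]) hc h1)
      · exact Or.inr (Or.inl h2)
      · exact Or.inr (Or.inr ⟨c', hc', h3⟩)

theorem pvRA_empty_iff {f s m} :
    pvRA f [] s m ↔ Relation.ReflTransGen (fun a b => b ∈ f a) s m := by
  constructor
  · intro h
    induction h with
    | refl s _ => exact Relation.ReflTransGen.refl
    | step s c t _ hc _ ih => exact Relation.ReflTransGen.head hc ih
  · intro h
    induction h using Relation.ReflTransGen.head_induction_on with
    | refl => exact pvRA.refl _ (by simp)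
    | head hr _ ih => exact pvRA.step _ _ _ (by simp) hr ih

-- DFS result characterization
theorem pvDfs_mem (f : String → List String) (U : List String) (hf : ∀ n x, x ∈ f n → x ∈ U)
    (visited : PySem.Set String) (stack : List String) (hst : ∀ x ∈ stack, x ∈ U) (m : String) :
    m ∈ pvDfs f U hf visited stack hst ↔ m ∈ visited ∨ ∃ s ∈ stack, pvRA f visited s m := by
  induction visited, stack, hst using pvDfs.induct f U hf with
  | case1 visited hst =>
      rw [pvDfs]
      simp
  | case2 visited n rest hst h _ ih =>
      rw [pvDfs, dif_pos h]
      rw [ih]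
      have hnV : n ∈ visited := (PySem.Set.contains_iff visited n).mp h
      constructor
      · rintro (hm | ⟨s, hs, hra⟩)
        · exact Or.inl hm
        · exact Or.inr ⟨s, List.mem_cons_of_mem _ hs, hra⟩
      · rintro (hm | ⟨s, hs, hra⟩)
        · exact Or.inl hm
        · rcases List.mem_cons.mp hs with rfl | hs'
          · exact absurd hnV (pvRA_head_not_mem hra)
          · exact Or.inr ⟨s, hs', hra⟩
  | case3 visited n rest hst h _ ih =>
      rw [pvDfs, dif_neg h]
      have hn : n ∉ visited := fun hm => h ((PySem.Set.contains_iff visited n).mpr hm)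
      have hadd : visited.add n = visited ++ [n] := by
        simp [PySem.Set.add, hn]
      rw [ih, hadd]
      constructor
      · rintro (hm | ⟨s, hs, hra⟩)
        · rcases List.mem_append.mp hm with hm | hm
          · exact Or.inl hm
          · obtain rfl := List.mem_singleton.mp hm
            exact Or.inr ⟨m, List.mem_cons_self, pvRA.refl m hn⟩
        · rcases List.mem_append.mp hs with hs' | hs'
          · exact Or.inr ⟨n, List.mem_cons_self,
              pvRA.step n s m hn (List.mem_reverse.mp hs') (pvRA_mono hra)⟩
          · exact Or.inr ⟨s, List.mem_cons_of_mem _ hs', pvRA_mono hra⟩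
      · rintro (hm | ⟨s, hs, hra⟩)
        · exact Or.inl (List.mem_append.mpr (Or.inl hm))
        · rcases pvRA_split hn hra with h1 | h2 | ⟨c, hc, h3⟩
          · rcases List.mem_cons.mp hs with rfl | hs'
            · exact absurd (List.mem_append.mpr (Or.inr (by simp)))
                (pvRA_head_not_mem h1)
            · exact Or.inr ⟨s, List.mem_append.mpr (Or.inr hs'), h1⟩
          · exact Or.inl (List.mem_append.mpr (Or.inr (by simp [h2])))
          · exact Or.inr ⟨c, List.mem_append.mpr (Or.inl (List.mem_reverse.mpr hc)), h3⟩

theorem pvDfs_nodup (f : String → List String) (U : List String) (hf : ∀ n x, x ∈ f n → x ∈ U)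
    (visited : PySem.Set String) (stack : List String) (hst : ∀ x ∈ stack, x ∈ U)
    (h : visited.Nodup) : (pvDfs f U hf visited stack hst).Nodup := by
  induction visited, stack, hst using pvDfs.induct f U hf with
  | case1 visited hst => rw [pvDfs]; exact h
  | case2 visited n rest hst hc _ ih => rw [pvDfs, dif_pos hc]; exact ih h
  | case3 visited n rest hst hc _ ih =>
      rw [pvDfs, dif_neg hc]
      exact ih (PySem.Set.nodup_add visited n h)

-- parent edges of B's chain walk
def pvParf (c2p : PySem.Dict String String) (y : String) : List String := (c2p.get? y).toList

theorem pvChain_fst_counts (c2p : PySem.Dict String String) (U : List String)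
    (hvals : ∀ v ∈ c2p.values, v ∈ U) (seen : PySem.Set String)
    (counts counts' : PySem.Dict String Int) (cur : Option String)
    (hcur : ∀ x, cur = some x → x ∈ U) :
    (pvChain c2p U hvals seen counts cur hcur).1 = (pvChain c2p U hvals seen counts' cur hcur).1 := by
  induction seen, counts, cur, hcur using pvChain.induct c2p U hvals generalizing counts' with
  | case1 seen counts hcur _ => rw [pvChain, pvChain]
  | case2 seen counts x hcur h _ => rw [pvChain, pvChain, dif_pos h, dif_pos h]
  | case3 seen counts x hcur h _ ih =>
      rw [pvChain, pvChain, dif_neg h, dif_neg h]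
      exact ih _

theorem pvChain_fst_mem (c2p : PySem.Dict String String) (U : List String)
    (hvals : ∀ v ∈ c2p.values, v ∈ U) (seen : PySem.Set String)
    (counts : PySem.Dict String Int) (cur : Option String)
    (hcur : ∀ x, cur = some x → x ∈ U) (m : String) :
    m ∈ (pvChain c2p U hvals seen counts cur hcur).1 ↔
      m ∈ seen ∨ ∃ x, cur = some x ∧ pvRA (pvParf c2p) seen x m := by
  induction seen, counts, cur, hcur using pvChain.induct c2p U hvals with
  | case1 seen counts hcur _ => rw [pvChain]; simp
  | case2 seen counts x hcur h _ =>
      rw [pvChain, dif_pos h]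
      have hx : x ∈ seen := (PySem.Set.contains_iff seen x).mp h
      simp only []
      constructor
      · exact fun hm => Or.inl hm
      · rintro (hm | ⟨y, hy, hra⟩)
        · exact hm
        · injection hy with hy
          exact absurd hx (hy ▸ pvRA_head_not_mem hra)
  | case3 seen counts x hcur h _ ih =>
      rw [pvChain, dif_neg h]
      have hx : x ∉ seen := fun hm => h ((PySem.Set.contains_iff seen x).mpr hm)
      have hadd : seen.add x = seen ++ [x] := by simp [PySem.Set.add, hx]
      rw [ih, hadd]
      constructor
      · rintro (hm | ⟨y, hy, hra⟩)
        · rcases List.mem_append.mp hm with hm | hm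
          · exact Or.inl hm
          · obtain rfl := List.mem_singleton.mp hm
            exact Or.inr ⟨m, rfl, pvRA.refl m hx⟩
        · refine Or.inr ⟨x, rfl, pvRA.step x y m hx ?_ (pvRA_mono hra)⟩
          simp [pvParf, hy]
      · rintro (hm | ⟨y, hy, hra⟩)
        · exact Or.inl (List.mem_append.mpr (Or.inl hm))
        · injection hy with hy
          subst hy
          rcases pvRA_split hx hra with h1 | h2 | ⟨c, hc, h3⟩
          · exact absurd (List.mem_append.mpr (Or.inr (by simp))) (pvRA_head_not_mem h1)
          · exact Or.inl (List.mem_append.mpr (Or.inr (by simp [h2])))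
          · refine Or.inr ⟨c, ?_, h3⟩
            simpa [pvParf, Option.mem_def] using hc

theorem pvChain_snd_getD (c2p : PySem.Dict String String) (U : List String)
    (hvals : ∀ v ∈ c2p.values, v ∈ U) (seen : PySem.Set String)
    (counts : PySem.Dict String Int) (cur : Option String)
    (hcur : ∀ x, cur = some x → x ∈ U) (n : String) :
    ((pvChain c2p U hvals seen counts cur hcur).2).getD n 0 =
      counts.getD n 0 +
        (if n ∈ (pvChain c2p U hvals seen counts cur hcur).1 ∧ n ∉ seen then 1 else 0) := by
  induction seen, counts, cur, hcur using pvChain.induct c2p U hvals with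
  | case1 seen counts hcur _ =>
      rw [pvChain]
      simp
  | case2 seen counts x hcur h _ =>
      rw [pvChain, dif_pos h]
      simp
  | case3 seen counts x hcur h _ ih =>
      have hx : x ∉ seen := fun hm => h ((PySem.Set.contains_iff seen x).mpr hm)
      rw [pvChain, dif_neg h, ih]
      simp only [pvChain_fst_mem, PySem.Set.mem_add, PySem.Dict.getD_insert]
      by_cases hnx : n = x
      · subst hnx
        simp [hx]
        rw [pvChain_fst_mem]
        exact Or.inl (List.mem_append.mpr (Or.inr (by simp)))
      · simp only [hnx, if_false]
        simp [PySem.Set.mem_add, hnx]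

-- the seen-set of one chain walk from c (counts-independent by pvChain_fst_counts)
def pvChainSet (c2p : PySem.Dict String String) (c : String) : PySem.Set String :=
  (pvChain c2p (c :: c2p.values) (fun v hv => List.mem_cons_of_mem _ hv)
     PySem.Set.empty PySem.Dict.empty (some c)
     (fun x hx => by injection hx with h; exact h ▸ List.mem_cons_self)).1

theorem pvCountsB_getD_aux (c2p : PySem.Dict String String) (l : List String)
    (counts : PySem.Dict String Int) (n : String) :
    (l.foldl
      (fun counts c =>
        (pvChain c2p (c :: c2p.values) (fun v hv => List.mem_cons_of_mem _ hv)
           PySem.Set.empty counts (some c)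
           (fun x hx => by injection hx with h; exact h ▸ List.mem_cons_self)).2)
      counts).getD n 0 =
    counts.getD n 0 + ((l.filter (fun c => decide (n ∈ pvChainSet c2p c))).length : Int) := by
  induction l generalizing counts with
  | nil => simp
  | cons c l ih =>
      rw [List.foldl_cons, ih, pvChain_snd_getD]
      have hfst : (pvChain c2p (c :: c2p.values) (fun v hv => List.mem_cons_of_mem _ hv)
          PySem.Set.empty counts (some c)
          (fun x hx => by injection hx with h; exact h ▸ List.mem_cons_self)).1 =
          pvChainSet c2p c := by
        unfold pvChainSet
        exact pvChain_fst_counts c2p _ _ _ counts PySem.Dict.empty (some c) _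
      rw [hfst]
      by_cases hm : n ∈ pvChainSet c2p c
      · rw [if_pos ⟨hm, by simp [PySem.Set.empty]⟩, List.filter_cons_of_pos (by simpa using hm)]
        simp only [List.length_cons]
        push_cast
        ring
      · rw [if_neg (fun hc => hm hc.1), List.filter_cons_of_neg (by simpa using hm)]
        ring

theorem pvCountsB_getD (c2p : PySem.Dict String String) (n : String) :
    (pvCountsB c2p).getD n 0 =
      ((c2p.keys.filter (fun c => decide (n ∈ pvChainSet c2p c))).length : Int) := by
  unfold pvCountsB
  rw [pvCountsB_getD_aux, PySem.Dict.getD_empty]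
  ring

theorem pv_mem_p2c (c2p : PySem.Dict String String) (hk : c2p.keys.Nodup) (k x : String) :
    x ∈ (pvP2c c2p).getD k [] ↔ c2p.get? x = some k := by
  have h1 : pvP2c c2p = (c2p.items.map (fun cp => (cp.2, cp.1))).foldl
      (fun d p => d.modify p.1 [] (· ++ [p.2])) PySem.Dict.empty := by
    unfold pvP2c
    rw [List.foldl_map]
    rfl
  rw [h1, PySem.Dict.getD_foldl_modify_append, PySem.Dict.getD_empty, List.nil_append]
  constructor
  · intro hx
    rcases List.mem_map.mp hx with ⟨p, hp, rfl⟩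
    rcases List.mem_filter.mp hp with ⟨hpmem, hpk⟩
    rcases List.mem_map.mp hpmem with ⟨cp, hcp, rfl⟩
    have hk2 : cp.2 = k := by simpa using hpk
    refine (PySem.Dict.get?_eq_some_iff_mem_items c2p cp.1 k hk).mpr ?_
    rw [← hk2]
    exact hcp
  · intro hg
    have hmem : (x, k) ∈ c2p.items := (PySem.Dict.get?_eq_some_iff_mem_items c2p x k hk).mp hg
    exact List.mem_map.mpr ⟨(k, x),
      List.mem_filter.mpr ⟨List.mem_map.mpr ⟨(x, k), hmem, rfl⟩, by simp⟩, rfl⟩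

theorem pv_ra_dual (c2p : PySem.Dict String String) (hk : c2p.keys.Nodup) (n m : String) :
    pvRA (fun y => (pvP2c c2p).getD y []) [] n m ↔ pvRA (pvParf c2p) [] m n := by
  have hedge : ∀ a b : String, b ∈ (pvP2c c2p).getD a [] ↔ a ∈ pvParf c2p b := by
    intro a b
    rw [pv_mem_p2c c2p hk]
    simp [pvParf]
  rw [pvRA_empty_iff, pvRA_empty_iff]
  constructor
  · intro h
    exact (Relation.reflTransGen_swap).mp (h.mono (fun a b hab => (hedge a b).mp hab))
  · intro h
    exact (Relation.reflTransGen_swap).mp (h.mono (fun a b hab => (hedge b a).mpr hab))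

theorem pvChainSet_mem (c2p : PySem.Dict String String) (c m : String) :
    m ∈ pvChainSet c2p c ↔ pvRA (pvParf c2p) [] c m := by
  unfold pvChainSet
  rw [pvChain_fst_mem]
  simp [PySem.Set.empty]

theorem pvCountDesc_spec (c2p : PySem.Dict String String) (n : String) :
    ∃ S : PySem.Set String, pvCountDesc c2p n = S.length ∧ S.Nodup ∧
      ∀ m, m ∈ S ↔ pvRA (fun y => (pvP2c c2p).getD y []) [] n m := by
  unfold pvCountDesc
  refine ⟨_, rfl, pvDfs_nodup _ _ _ _ _ _ (by simp [PySem.Set.empty]), ?_⟩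
  intro m
  rw [pvDfs_mem]
  simp [PySem.Set.empty]

theorem pv_count_eq (c2p : PySem.Dict String String) (hk : c2p.keys.Nodup) (n : String) :
    (pvCountDesc c2p n : Int) =
      (pvCountsB c2p).getD n 0 + (if c2p.contains n then 0 else 1) := by
  obtain ⟨S, hlen, hnd, hmem⟩ := pvCountDesc_spec c2p n
  rw [hlen, pvCountsB_getD]
  have hF := c2p.keys.filter_sublist (p := fun c => decide (n ∈ pvChainSet c2p c))
  set F := c2p.keys.filter (fun c => decide (n ∈ pvChainSet c2p c)) with hFdef
  have hFmem : ∀ c, c ∈ F ↔ c ∈ c2p.keys ∧ pvRA (fun y => (pvP2c c2p).getD y []) [] n c := by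
    intro c
    rw [hFdef, List.mem_filter]
    constructor
    · rintro ⟨h1, h2⟩
      exact ⟨h1, (pv_ra_dual c2p hk n c).mpr ((pvChainSet_mem c2p c n).mp (by simpa using h2))⟩
    · rintro ⟨h1, h2⟩
      exact ⟨h1, by simpa using (pvChainSet_mem c2p c n).mpr ((pv_ra_dual c2p hk n c).mp h2)⟩
  have hkeys : ∀ m, m ∈ S → m ≠ n → m ∈ c2p.keys := by
    intro m hm hmn
    have hra := (hmem m).mp hm
    rw [pvRA_empty_iff] at hra
    rcases Relation.ReflTransGen.cases_tail hra with h1 | ⟨c, _, hcm⟩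
    · exact absurd h1 hmn
    · have : c2p.get? m = some c := (pv_mem_p2c c2p hk c m).mp hcm
      by_contra hnk
      rw [(PySem.Dict.get?_eq_none_iff_not_mem_keys c2p m).mpr hnk] at this
      cases this
  have key : ∀ m, m ∈ S ↔ (m = n ∨ m ∈ F) := by
    intro m
    rw [hmem m]
    constructor
    · intro h
      by_cases hmn : m = n
      · exact Or.inl hmn
      · exact Or.inr ((hFmem m).mpr ⟨hkeys m ((hmem m).mpr h) hmn, h⟩)
    · rintro (rfl | hmF)
      · exact pvRA.refl m (by simp)
      · exact ((hFmem m).mp hmF).2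
  have hFnd : F.Nodup := hk.sublist hF
  by_cases hcont : c2p.contains n = true
  · have hnk : n ∈ c2p.keys := (PySem.Dict.contains_iff_mem_keys c2p n).mp hcont
    have hnF : n ∈ F := (hFmem n).mpr ⟨hnk, pvRA.refl n (by simp)⟩
    have hsame : ∀ m, m ∈ S ↔ m ∈ F := by
      intro m
      rw [key m]
      constructor
      · rintro (rfl | hm)
        · exact hnF
        · exact hm
      · exact Or.inr
    have hperm : S.Perm F := (List.perm_ext_iff_of_nodup hnd hFnd).mpr hsame
    rw [if_pos hcont, hperm.length_eq]
    ring
  · have hnk : n ∉ c2p.keys := fun hm => hcont ((PySem.Dict.contains_iff_mem_keys c2p n).mpr hm)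
    have hnF : n ∉ F := fun hm => hnk ((hFmem n).mp hm).1
    have hsame : ∀ m, m ∈ S ↔ m ∈ n :: F := by
      intro m
      rw [key m, List.mem_cons]
    have hperm : S.Perm (n :: F) :=
      (List.perm_ext_iff_of_nodup hnd (List.nodup_cons.mpr ⟨hnF, hFnd⟩)).mpr hsame
    rw [if_neg hcont, hperm.length_eq, List.length_cons]
    push_cast
    ring

-- ===== VERDICT (by name: the statement is the Claim_ definition above) =====
theorem auto_discover_category_roots_spec : Claim_equal_auto_discover_category_roots := by
  intro nodes rels m _
  unfold Spec_auto_discover_category_roots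
  unfold auto_discover_category_roots auto_discover_category_roots_alt
  have hk : (pvC2p rels).keys.Nodup := by
    unfold pvC2p
    exact PySem.Dict.nodup_keys_foldl_insert_key rels (fun pc => pc.2) (fun _ pc => pc.1)
      PySem.Dict.empty PySem.Dict.nodup_keys_empty
  have hfun :
      (fun (acc : PySem.Dict String String) (ni : String × String) =>
        if m ≤ (pvCountDesc (pvC2p rels) ni.1 : Int)
        then acc.insert (pvLabel ni.2) ni.2 else acc) =
      (fun acc ni =>
        if m ≤ (pvCountsB (pvC2p rels)).getD ni.1 0 +
            (if (pvC2p rels).contains ni.1 then 0 else 1)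
        then acc.insert (pvLabel ni.2) ni.2 else acc) := by
    funext acc ni
    rw [pv_count_eq (pvC2p rels) hk ni.1]
  rw [hfun]
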